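-- pv_equiv track=rewrite | github.com/tzvetandacov/Programming0 | week8/order_of_seats.py | order_of_seats
-- ===== SOURCE A (Python) =====
-- def inc(x):
--     return x + 1
--
-- def order_of_seats(cinema):
--     r = 1
--     e = 0
--     cinematic = [[e,e,e],
--                  [r,e,r],
--                  [r,e,e],
--                  [e,r,r]]
--     result = []
--     full_row = len(cinema[0])
--     for empty_seats in range(1, len(cinema[0])+1):
--         for index_row in range(0, len(cinema)):
--             for index_col in range(0, len(cinema[0])):
--                 if sum(cinema[index_row]) == full_row - empty_seats:
--                     if cinema[index_row][index_col] == e: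
--                         result.append(("your_seat_is:",inc(index_row) ,inc(index_col)))
--     return result
-- ===== SOURCE B (Python) =====
-- def order_of_seats(cinema):
--     # One pass over the cells: bucket each row's empty-seat tuples by its
--     # empty-seat count, then emit the buckets in order 1..C.
--     full_row = len(cinema[0])
--     buckets = [[] for _ in range(full_row + 1)]
--     for i, row in enumerate(cinema):
--         k = full_row - sum(row)
--         if 1 <= k <= full_row:
--             buckets[k].extend(("your_seat_is:", i + 1, j + 1)
--                               for j in range(full_row) if row[j] == 0)
--     result = []
--     for k in range(1, full_row + 1):
--         result.extend(buckets[k])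
--     return result
-- ===== Notes on version B (the rewrite author's own statement) =====
-- stated objective: faster
-- what changed: Replaces A's triple nested loop, which rescans every cell of the cinema once per candidate empty-seat count, by a single pass that buckets each row's empty-seat tuples by the row's empty-seat count and then emits the buckets in count order 1..C.
import Mathlib
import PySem

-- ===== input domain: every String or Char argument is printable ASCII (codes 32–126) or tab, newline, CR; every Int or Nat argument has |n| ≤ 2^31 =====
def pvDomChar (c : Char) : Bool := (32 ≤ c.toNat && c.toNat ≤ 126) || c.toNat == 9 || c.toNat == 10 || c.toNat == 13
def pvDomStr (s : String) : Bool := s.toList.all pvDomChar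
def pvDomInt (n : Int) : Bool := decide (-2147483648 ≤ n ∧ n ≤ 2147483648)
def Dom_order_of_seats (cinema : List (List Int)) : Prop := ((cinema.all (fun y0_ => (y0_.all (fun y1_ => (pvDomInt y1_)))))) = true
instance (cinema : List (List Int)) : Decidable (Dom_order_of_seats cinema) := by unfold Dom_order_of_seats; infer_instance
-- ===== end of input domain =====

-- B replaces A's triple nested loop (which rescans every cell once per candidate
-- empty-seat count) by one pass bucketing rows by their empty-seat count; faster.

-- ===== PORT A =====
def inc (x : Int) : Int := x + 1

def order_of_seats (cinema : List (List Int)) : List (String × Int × Int) :=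
  let e : Int := 0
  let full_row : Int := PySem.List.len (PySem.List.pyGetD cinema 0 [])
  (PySem.List.pyRange 1 (PySem.List.len (PySem.List.pyGetD cinema 0 []) + 1) 1).foldl
    (fun result empty_seats =>
      (PySem.List.pyRange 0 (PySem.List.len cinema) 1).foldl
        (fun result index_row =>
          (PySem.List.pyRange 0 (PySem.List.len (PySem.List.pyGetD cinema 0 [])) 1).foldl
            (fun result index_col =>
              if (PySem.List.pyGetD cinema index_row []).sum = full_row - empty_seats then
                if PySem.List.pyGetD (PySem.List.pyGetD cinema index_row []) index_col 0 = e then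
                  result ++ [("your_seat_is:", inc index_row, inc index_col)]
                else result
              else result)
            result)
        result)
    []

-- ===== PORT B =====
def order_of_seats_alt (cinema : List (List Int)) : List (String × Int × Int) :=
  let full_row : Int := PySem.List.len (PySem.List.pyGetD cinema 0 [])
  let buckets : List (List (String × Int × Int)) :=
    (PySem.List.pyRange 0 (full_row + 1) 1).map (fun _ => [])
  let buckets :=
    (PySem.List.enumerate cinema).foldl
      (fun buckets p =>
        let k : Int := full_row - p.2.sum
        if 1 ≤ k ∧ k ≤ full_row then
          PySem.List.pySetD buckets k
            (PySem.List.pyGetD buckets k [] ++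
              ((PySem.List.pyRange 0 full_row 1).filter
                  (fun j => PySem.List.pyGetD p.2 j 0 == 0)).map
                (fun j => ("your_seat_is:", p.1 + 1, j + 1)))
        else buckets)
      buckets
  (PySem.List.pyRange 1 (full_row + 1) 1).foldl
    (fun result k => result ++ PySem.List.pyGetD buckets k []) []

-- ===== PRECONDITION & SPEC =====
-- Pre_ excludes exactly the inputs where the Python raises IndexError: the empty
-- cinema (cinema[0]), and ragged inputs where some row shorter than row 0 has an
-- empty-seat count in 1..len(row 0), so the column loop indexes past its end.
def Pre_order_of_seats (cinema : List (List Int)) : Prop :=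
  cinema ≠ [] ∧
    ∀ row ∈ cinema,
      (0 ≤ row.sum ∧ row.sum < ((cinema.headD []).length : Int)) →
        (cinema.headD []).length ≤ row.length
instance (cinema : List (List Int)) : Decidable (Pre_order_of_seats cinema) := by
  unfold Pre_order_of_seats; infer_instance

def pvWitness_order_of_seats : List (List Int) := [[0, 1, 0], [1, 1, 1], [0, 0, 0]]

def Spec_order_of_seats (cinema : List (List Int)) (out : List (String × Int × Int)) : Prop := out = order_of_seats_alt cinema
instance (cinema : List (List Int)) (out : List (String × Int × Int)) : Decidable (Spec_order_of_seats cinema out) := by unfold Spec_order_of_seats; infer_instance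

-- ===== CLAIM (what is proved, stated in full; the proofs are below) =====
def Claim_equal_order_of_seats : Prop := ∀ (cinema : List (List Int)), Dom_order_of_seats cinema → Pre_order_of_seats cinema → Spec_order_of_seats cinema (order_of_seats cinema)

-- ===== LEMMAS AND PROOFS =====

-- the empty-seat tuples of row `row` (index i), scanning columns 0..C-1
def pvZeros (C i : Int) (row : List Int) : List (String × Int × Int) :=
  ((PySem.List.pyRange 0 C 1).filter (fun j => PySem.List.pyGetD row j 0 == 0)).map
    (fun j => ("your_seat_is:", i + 1, j + 1))

-- both sides equal this canonical form
def pvCanon (cinema : List (List Int)) : List (String × Int × Int) :=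
  let C : Int := PySem.List.len (PySem.List.pyGetD cinema 0 [])
  (PySem.List.pyRange 1 (C + 1) 1).flatMap (fun k =>
    (PySem.List.enumerate cinema).flatMap (fun p =>
      if p.2.sum = C - k then pvZeros C p.1 p.2 else []))

-- rows bucketed by empty-seat count k: the tuples every row with count k contributes
def pvBucket (cinema : List (List Int)) (C k : Int) : List (String × Int × Int) :=
  (PySem.List.enumerate cinema).flatMap
    (fun p => if p.2.sum = C - k then pvZeros C p.1 p.2 else [])

theorem col_loop (C i : Int) (row : List Int) (a : List (String × Int × Int)) :
    (PySem.List.pyRange 0 C 1).foldl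
      (fun acc j => if PySem.List.pyGetD row j 0 = 0 then
          acc ++ [("your_seat_is:", i + 1, j + 1)] else acc) a
    = a ++ pvZeros C i row := by
  unfold pvZeros
  rw [← PySem.List.foldl_append_if (fun j => PySem.List.pyGetD row j 0 == 0)
        (fun j => ("your_seat_is:", i + 1, j + 1)) _ a]
  simp

theorem cell_loop (C e i : Int) (row : List Int) (a : List (String × Int × Int)) :
    (PySem.List.pyRange 0 C 1).foldl
      (fun acc j => if row.sum = C - e then
          (if PySem.List.pyGetD row j 0 = 0 then
            acc ++ [("your_seat_is:", i + 1, j + 1)] else acc)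
        else acc) a
    = a ++ (if row.sum = C - e then pvZeros C i row else []) := by
  by_cases h : row.sum = C - e
  · simp only [h, if_true]
    exact col_loop C i row a
  · simp [h]

theorem row_loop (cinema : List (List Int)) (C e : Int) (a : List (String × Int × Int)) :
    (PySem.List.pyRange 0 (PySem.List.len cinema) 1).foldl
      (fun acc i =>
        (PySem.List.pyRange 0 C 1).foldl
          (fun acc j => if (PySem.List.pyGetD cinema i []).sum = C - e then
              (if PySem.List.pyGetD (PySem.List.pyGetD cinema i []) j 0 = 0 then
                acc ++ [("your_seat_is:", i + 1, j + 1)] else acc)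
            else acc) acc) a
    = a ++ pvBucket cinema C e := by
  have hfun : (fun (acc : List (String × Int × Int)) (i : Int) =>
      (PySem.List.pyRange 0 C 1).foldl
        (fun acc j => if (PySem.List.pyGetD cinema i []).sum = C - e then
            (if PySem.List.pyGetD (PySem.List.pyGetD cinema i []) j 0 = 0 then
              acc ++ [("your_seat_is:", i + 1, j + 1)] else acc)
          else acc) acc)
      = (fun acc i => acc ++
          (if (PySem.List.pyGetD cinema i []).sum = C - e then
            pvZeros C i (PySem.List.pyGetD cinema i []) else [])) := by
    funext acc i
    exact cell_loop C e i (PySem.List.pyGetD cinema i []) acc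
  rw [hfun, PySem.List.foldl_append_eq_flatMap]
  unfold pvBucket
  rw [PySem.List.enumerate_eq_map_pyRange cinema [], List.flatMap_map]

theorem order_of_seats_eq_canon (cinema : List (List Int)) :
    order_of_seats cinema = pvCanon cinema := by
  unfold order_of_seats pvCanon
  have hfun : (fun (result : List (String × Int × Int)) (empty_seats : Int) =>
      (PySem.List.pyRange 0 (PySem.List.len cinema) 1).foldl
        (fun result index_row =>
          (PySem.List.pyRange 0 (PySem.List.len (PySem.List.pyGetD cinema 0 [])) 1).foldl
            (fun result index_col =>
              if (PySem.List.pyGetD cinema index_row []).sum =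
                  PySem.List.len (PySem.List.pyGetD cinema 0 []) - empty_seats then
                if PySem.List.pyGetD (PySem.List.pyGetD cinema index_row []) index_col 0 = 0 then
                  result ++ [("your_seat_is:", inc index_row, inc index_col)]
                else result
              else result)
            result)
        result)
      = (fun result k => result ++
          pvBucket cinema (PySem.List.len (PySem.List.pyGetD cinema 0 [])) k) := by
    funext result k
    simpa [inc] using
      row_loop cinema (PySem.List.len (PySem.List.pyGetD cinema 0 [])) k result
  simp only [hfun, PySem.List.foldl_append_eq_flatMap]
  rfl

theorem buckets_inv (C : Int) (l : List (Int × List Int))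
    (bs : List (List (String × Int × Int))) (k : Int)
    (hk1 : 1 ≤ k) (hk2 : k ≤ C) (hlen : (C + 1).toNat ≤ bs.length) :
    PySem.List.pyGetD
      (l.foldl (fun buckets p =>
        if 1 ≤ C - p.2.sum ∧ C - p.2.sum ≤ C then
          PySem.List.pySetD buckets (C - p.2.sum)
            (PySem.List.pyGetD buckets (C - p.2.sum) [] ++ pvZeros C p.1 p.2)
        else buckets) bs)
      k []
    = PySem.List.pyGetD bs k [] ++
        l.flatMap (fun p => if p.2.sum = C - k then pvZeros C p.1 p.2 else []) := by
  induction l generalizing bs with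
  | nil => simp
  | cons p l ih =>
    simp only [List.foldl_cons, List.flatMap_cons]
    by_cases hg : 1 ≤ C - p.2.sum ∧ C - p.2.sum ≤ C
    · rw [if_pos hg, ih _ (by rw [PySem.List.length_pySetD]; exact hlen)]
      have hkey : C - p.2.sum = ((C - p.2.sum).toNat : Int) := by omega
      have hkk : k = (k.toNat : Int) := by omega
      have hset : PySem.List.pyGetD
          (PySem.List.pySetD bs (C - p.2.sum)
            (PySem.List.pyGetD bs (C - p.2.sum) [] ++ pvZeros C p.1 p.2)) k []
          = if k.toNat = (C - p.2.sum).toNat then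
              PySem.List.pyGetD bs (C - p.2.sum) [] ++ pvZeros C p.1 p.2
            else PySem.List.pyGetD bs k [] := by
        rw [hkey, hkk]
        exact PySem.List.pyGetD_pySetD_natCast bs (C - p.2.sum).toNat k.toNat _ _ (by omega)
      rw [hset]
      by_cases heq : p.2.sum = C - k
      · have : k.toNat = (C - p.2.sum).toNat := by omega
        simp only [this, if_true, heq, List.append_assoc]
        congr 2
        omega
      · have : ¬ (k.toNat = (C - p.2.sum).toNat) := by omega
        simp [this, heq]
    · have heq : ¬ (p.2.sum = C - k) := by
        intro h; exact hg ⟨by omega, by omega⟩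
      rw [if_neg hg, ih _ hlen, if_neg heq]
      simp

theorem order_of_seats_alt_eq_canon (cinema : List (List Int)) :
    order_of_seats_alt cinema = pvCanon cinema := by
  unfold order_of_seats_alt pvCanon
  rw [PySem.List.foldl_append_eq_flatMap]
  simp only [List.nil_append]
  apply List.flatMap_congr
  intro k hk
  rw [PySem.List.mem_pyRange_one] at hk
  have hC : (0 : Int) ≤ PySem.List.len (PySem.List.pyGetD cinema 0 []) := by
    rw [PySem.List.len_eq]; positivity
  simp only [show ∀ (i : Int) (row : List Int),
      (((PySem.List.pyRange 0 (PySem.List.len (PySem.List.pyGetD cinema 0 [])) 1).filter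
          (fun j => PySem.List.pyGetD row j 0 == 0)).map
        (fun j => ("your_seat_is:", i + 1, j + 1)))
      = pvZeros (PySem.List.len (PySem.List.pyGetD cinema 0 [])) i row
    from fun _ _ => rfl]
  rw [buckets_inv _ _ _ k hk.1 (by omega)
      (by simp [PySem.List.length_pyRange_one])]
  rw [PySem.List.pyGetD_map_pyRange_of_nonneg _ _ k [] (by omega) (by omega)]
  simp [pvZeros]

-- ===== VERDICT (by name: the statement is the Claim_ definition above) =====
theorem order_of_seats_spec : Claim_equal_order_of_seats := by
  intro cinema _ _
  unfold Spec_order_of_seats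
  rw [order_of_seats_eq_canon, order_of_seats_alt_eq_canon]
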